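-- pv_equiv track=rewrite | github.com/nicksnlp/arthunt | Final_Project/combined_search.py | wildcard_parser
-- ===== SOURCE A (Python) =====
-- import itertools
--
-- def wildcard_parser(query, terms):
--     splited_query = query.lower().split()
--     new_query_list = []
--
--     # replace words with '*' by possible words in the vocab,
--     # store new queries in a list
--
--     # find the word with '*'
--     for idx, word in enumerate(splited_query):
--         if "*" in word:
--             # ignors the middle part if there's more than 1 "*" in the word
--             prefix = word.split('*')[0]
--             suffix = word.split('*')[-1]
--
--             #possible replacements for the current word in query
--             replacement_words = []
--
--             # find all possible replacements
--             for t in terms: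
--                 if t.startswith(prefix) and t.endswith(suffix):
--                     replacement_words.append(t)
--
--             # replace each word with '*' by a list of all possible replacement words from vocab
--             splited_query[idx] = replacement_words
--
--         # if no '*' in the current word, just trun it into a list
--         else:
--             splited_query[idx] = [word]
--
--     # generate new queries bease on the updated splited_query:
--     splited_query = list(itertools.product(*splited_query))
--
--     # store new all possible queries to new_query_list
--     for l in splited_query:
--         new_query_list.append(" ".join(l))
--
--     return new_query_list
-- ===== SOURCE B (Python) =====
-- def wildcard_parser(query, terms):
--     def expand(words):
--         # recursively expand words, building the joined query strings directly
--         w = words[0]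
--         if '*' in w:
--             parts = w.split('*')
--             opts = [t for t in terms if t.startswith(parts[0]) and t.endswith(parts[-1])]
--         else:
--             opts = [w]
--         if len(words) == 1:
--             return opts
--         tails = expand(words[1:])
--         return [o + ' ' + r for o in opts for r in tails]
--     words = query.lower().split()
--     return expand(words) if words else ['']
-- ===== Notes on version B (the rewrite author's own statement) =====
-- stated objective: alternative
-- what changed: Replaces A's three staged passes (mutate the word list into option lists, itertools.product over them, then a join loop) with a single recursive right-to-left expansion that filters each word's options on the fly and concatenates them directly onto the already-expanded tail strings, never materialising tuples or calling join.
import Mathlib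
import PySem

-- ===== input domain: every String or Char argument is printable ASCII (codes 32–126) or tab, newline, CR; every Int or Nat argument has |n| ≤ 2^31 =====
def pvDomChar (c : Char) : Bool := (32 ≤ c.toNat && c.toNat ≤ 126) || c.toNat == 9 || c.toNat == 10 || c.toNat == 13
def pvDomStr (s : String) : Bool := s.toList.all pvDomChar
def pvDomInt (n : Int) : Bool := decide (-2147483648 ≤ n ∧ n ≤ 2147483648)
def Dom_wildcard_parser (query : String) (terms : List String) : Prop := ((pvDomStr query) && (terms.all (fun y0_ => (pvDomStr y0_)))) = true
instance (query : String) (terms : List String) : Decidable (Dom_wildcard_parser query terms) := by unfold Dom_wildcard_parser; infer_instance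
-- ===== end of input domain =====

-- B replaces the staged passes (per-word option lists, itertools.product, a join loop) with one
-- recursive right-to-left expansion that builds the joined query strings directly; same return value, proved equal.

-- ===== PORT A =====
-- itertools.product(*lists), in itertools' order (leftmost factor varies slowest)
def pvProduct : List (List String) → List (List String)
  | [] => [[]]
  | xs :: rest => xs.flatMap (fun x => (pvProduct rest).map (fun l => x :: l))

def wildcard_parser (query : String) (terms : List String) : List String :=
  -- the enumerate loop overwrites splited_query[idx] with a value depending only on that word: a map
  let splited_query : List (List String) :=
    (PySem.Str.split₀ (PySem.Str.lower query)).map (fun word =>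
      if PySem.Str.isIn "*" word then
        let parts := ((PySem.Str.split? word "*").getD [])
        let prefixW := parts.headD ""       -- word.split('*')[0]; split is never empty
        let suffixW := parts.getLastD ""    -- word.split('*')[-1]
        terms.foldl (fun acc t =>
          if PySem.Str.startswith t prefixW && PySem.Str.endswith t suffixW
          then acc ++ [t] else acc) []
      else [word])
  (pvProduct splited_query).foldl (fun acc l => acc ++ [PySem.Str.join " " l]) []

-- ===== PORT B =====
-- the options for one query word: either [word] or the matching terms
def pvOpts (terms : List String) (w : String) : List String :=
  if PySem.Str.isIn "*" w then
    let parts := ((PySem.Str.split? w "*").getD [])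
    terms.filter (fun t =>
      PySem.Str.startswith t (parts.headD "") && PySem.Str.endswith t (parts.getLastD ""))
  else [w]

-- expand(words): recursion on the word list, joining each option onto every expansion of the tail
def pvExpand (terms : List String) : List String → List String
  | [] => [""]          -- unreachable (the caller handles the empty query); needed for totality
  | [w] => pvOpts terms w
  | w :: rest => (pvOpts terms w).flatMap (fun o =>
      (pvExpand terms rest).map (fun r => o ++ " " ++ r))

def wildcard_parser_alt (query : String) (terms : List String) : List String :=
  let words := PySem.Str.split₀ (PySem.Str.lower query)
  if words.isEmpty then [""] else pvExpand terms words

-- ===== PRECONDITION & SPEC =====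
def Spec_wildcard_parser (query : String) (terms : List String) (out : List String) : Prop := out = wildcard_parser_alt query terms
instance (query : String) (terms : List String) (out : List String) : Decidable (Spec_wildcard_parser query terms out) := by unfold Spec_wildcard_parser; infer_instance

-- ===== CLAIM (what is proved, stated in full; the proofs are below) =====
def Claim_equal_wildcard_parser : Prop := ∀ (query : String) (terms : List String), Dom_wildcard_parser query terms → Spec_wildcard_parser query terms (wildcard_parser query terms)

-- ===== LEMMAS AND PROOFS =====

-- " ".join(o :: l) = o + " " + " ".join(l) for nonempty l
theorem pv_join_cons (o : String) (l : List String) (h : l ≠ []) :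
    PySem.Str.join " " (o :: l) = o ++ " " ++ PySem.Str.join " " l := by
  cases l with
  | nil => exact absurd rfl h
  | cons q rest =>
      rw [← String.toList_inj]
      simp only [PySem.Str.toList_join, List.map_cons, String.toList_append,
        PySem.Chars.join_cons_cons]

-- the recursive expansion equals " ".join mapped over the cartesian product of the option lists
theorem pv_expand_eq (terms : List String) (ws : List String) :
    pvExpand terms ws
      = (pvProduct (ws.map (pvOpts terms))).map (fun l => PySem.Str.join " " l) := by
  have hsing : ∀ o : String, PySem.Str.join " " [o] = o := fun o => by
    rw [← String.toList_inj]
    simp [PySem.Str.toList_join, PySem.Chars.join_singleton]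
  have hcons : ∀ (x a : String) (l : List String),
      x ++ " " ++ PySem.Str.join " " (a :: l) = PySem.Str.join " " (x :: a :: l) :=
    fun x a l => (pv_join_cons x (a :: l) (by simp)).symm
  induction ws with
  | nil => simp [pvExpand, pvProduct, PySem.Str.join, PySem.Chars.join, List.intercalate]
  | cons w rest ih =>
      cases rest with
      | nil =>
          simp only [pvExpand, List.map_cons, List.map_nil, pvProduct,
            ← List.map_eq_flatMap, List.map_map, Function.comp_def, hsing]
          simp
      | cons q rest' =>
          show (pvOpts terms w).flatMap (fun o =>
              (pvExpand terms (q :: rest')).map (fun r => o ++ " " ++ r)) = _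
          rw [ih]
          simp only [List.map_cons, pvProduct, List.map_flatMap, List.map_map,
            Function.comp_def, hcons]

-- A's per-word replacement loop computes exactly pvOpts (an append-if fold is a filter)
theorem pv_word_eq (terms : List String) :
    (fun word => if PySem.Str.isIn "*" word then
        let parts := ((PySem.Str.split? word "*").getD [])
        let prefixW := parts.headD ""
        let suffixW := parts.getLastD ""
        terms.foldl (fun acc t =>
          if PySem.Str.startswith t prefixW && PySem.Str.endswith t suffixW
          then acc ++ [t] else acc) []
      else [word]) = pvOpts terms := by
  funext word
  by_cases h : PySem.Str.isIn "*" word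
  · simp only [pvOpts, if_pos h]
    exact (PySem.List.foldl_append_if _ id terms []).trans (by simp)
  · simp only [pvOpts, if_neg h]

theorem wildcard_parser_spec : Claim_equal_wildcard_parser := by
  intro query terms _
  unfold Spec_wildcard_parser wildcard_parser wildcard_parser_alt
  simp only [PySem.List.foldl_append_singleton_eq_map, List.nil_append, pv_word_eq]
  by_cases hws : PySem.Str.split₀ (PySem.Str.lower query) = []
  · rw [hws]
    simp [pvProduct, PySem.Str.join, PySem.Chars.join, List.intercalate]
  · rw [if_neg (fun hc => hws (List.isEmpty_iff.mp hc)), pv_expand_eq]
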